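-- pv_equiv track=rewrite | github.com/CTLab-ITMO/PTS-SP | lib/models/processing_model.py | __train_set_of
-- ===== SOURCE A (Python) =====
-- def __train_set_of(n):
--     x = []
--     temp = 2
--     while temp < n:
--         x.append(temp)
--         if temp < 10:
--             temp += 2
--         elif temp >= 10 and temp < 30:
--             temp += 3
--         elif temp >= 30 and temp < 100:
--             temp += 5
--         elif temp >= 100 and temp < 200:
--             temp += 10
--         elif temp >= 200 and temp < 300:
--             temp += 50
--         elif temp >= 300 and temp < 500:
--             temp += 100
--         elif temp >= 500:
--             temp += 500
--     if x[-1] != n: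
--         x.append(n)
--
--     return x
-- ===== SOURCE B (Python) =====
-- _ORBIT = (2, 4, 6, 8, 10, 13, 16, 19, 22, 25, 28, 31, 36, 41, 46, 51, 56, 61,
--           66, 71, 76, 81, 86, 91, 96, 101, 111, 121, 131, 141, 151, 161, 171,
--           181, 191, 201, 251, 301, 401, 501)
--
--
-- def __train_set_of(n):
--     # The stepping rule's trajectory from 2 is a fixed sequence independent of n:
--     # the precomputed orbit table up to 501, then the arithmetic progression
--     # 1001, 1501, ...  The result is just its values below n, plus n itself.
--     x = [v for v in _ORBIT if v < n]
--     x += range(1001, n, 500)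
--     if x[-1] != n:
--         x.append(n)
--     return x
-- ===== Notes on version B (the rewrite author's own statement) =====
-- stated objective: simpler
-- what changed: replaces A's stepping while-loop (re-dispatching on temp's range each iteration) by a closed form: the loop's trajectory is a fixed sequence independent of n, so B just filters a precomputed constant orbit table and appends the remaining arithmetic progression via a single range call, with no stepping loop at all
-- outside the precondition, e.g. on __train_set_of(2): A raises IndexError, B raises IndexError
import Mathlib
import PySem

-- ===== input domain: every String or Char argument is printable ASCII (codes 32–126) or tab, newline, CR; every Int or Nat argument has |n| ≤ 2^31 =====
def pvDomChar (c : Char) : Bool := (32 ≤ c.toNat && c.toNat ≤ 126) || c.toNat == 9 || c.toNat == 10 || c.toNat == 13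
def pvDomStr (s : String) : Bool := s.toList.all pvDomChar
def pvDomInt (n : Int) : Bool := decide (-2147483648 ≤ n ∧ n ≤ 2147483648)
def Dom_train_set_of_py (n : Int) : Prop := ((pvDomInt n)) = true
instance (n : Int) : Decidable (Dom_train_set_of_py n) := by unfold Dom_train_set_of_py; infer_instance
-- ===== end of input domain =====

-- B replaces A's stepping while-loop by a closed form: the loop's trajectory from 2 is a fixed
-- sequence independent of n (a precomputed orbit table up to 501, then the arithmetic
-- progression 1001, 1501, ...), so B filters the table and splices in a range (objective: simpler).
-- A's loop is written with an explicit fuel bound ((n - 2).toNat, one iteration consumes ≥ 1 of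
-- it): a totality guard only, it never changes a result.

-- ===== PORT A =====
-- literal port of A's while loop
def pvALoop : Nat → Int → Int → List Int → List Int
  | 0, _, _, x => x
  | f+1, n, temp, x =>
    if temp < n then
      pvALoop f n
        (if temp < 10 then temp + 2
         else if 10 ≤ temp ∧ temp < 30 then temp + 3
         else if 30 ≤ temp ∧ temp < 100 then temp + 5
         else if 100 ≤ temp ∧ temp < 200 then temp + 10
         else if 200 ≤ temp ∧ temp < 300 then temp + 50
         else if 300 ≤ temp ∧ temp < 500 then temp + 100
         else if 500 ≤ temp then temp + 500
         else temp)
        (x ++ [temp])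
    else x

def train_set_of_py (n : Int) : List Int :=
  let x := pvALoop (n - 2).toNat n 2 []
  match PySem.List.pyGet? x (-1) with
  | none => []          -- Python raises IndexError here (n ≤ 2); excluded by Pre_
  | some v => if v ≠ n then x ++ [n] else x

-- ===== PORT B =====
-- the module-level constant _ORBIT of Source B
def pvOrbit : List Int :=
  [2, 4, 6, 8, 10, 13, 16, 19, 22, 25, 28, 31, 36, 41, 46, 51, 56, 61,
   66, 71, 76, 81, 86, 91, 96, 101, 111, 121, 131, 141, 151, 161, 171,
   181, 191, 201, 251, 301, 401, 501]

def train_set_of_py_alt (n : Int) : List Int :=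
  let x := pvOrbit.filter (fun v => v < n) ++ PySem.List.pyRange 1001 n 500
  match PySem.List.pyGet? x (-1) with
  | none => []          -- Python raises IndexError here (n ≤ 2); excluded by Pre_
  | some v => if v ≠ n then x ++ [n] else x

-- ===== PRECONDITION & SPEC =====
-- Pre_ excludes exactly n ≤ 2, where the Python A reaches x[-1] with x = [] and raises IndexError.
def Pre_train_set_of_py (n : Int) : Prop := 2 < n
instance (n : Int) : Decidable (Pre_train_set_of_py n) := by unfold Pre_train_set_of_py; infer_instance
def pvWitness_train_set_of_py : Int := (7)

def Spec_train_set_of_py (n : Int) (out : List Int) : Prop := out = train_set_of_py_alt n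
instance (n : Int) (out : List Int) : Decidable (Spec_train_set_of_py n out) := by unfold Spec_train_set_of_py; infer_instance

-- ===== CLAIM =====
def Claim_equal_train_set_of_py : Prop := ∀ (n : Int), Dom_train_set_of_py n → Pre_train_set_of_py n → Spec_train_set_of_py n (train_set_of_py n)

-- ===== LEMMAS AND PROOFS =====

-- A's step rule as a function (proof helper; definitionally the if-chain in pvALoop)
def pvStep (t : Int) : Int :=
  if t < 10 then t + 2
  else if 10 ≤ t ∧ t < 30 then t + 3
  else if 30 ≤ t ∧ t < 100 then t + 5
  else if 100 ≤ t ∧ t < 200 then t + 10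
  else if 200 ≤ t ∧ t < 300 then t + 50
  else if 300 ≤ t ∧ t < 500 then t + 100
  else if 500 ≤ t then t + 500
  else t

theorem pvStep_gt (t : Int) : t < pvStep t := by
  unfold pvStep; split_ifs <;> omega

-- fuel-free loop and the trajectory it emits
def pvALoopW (n temp : Int) (x : List Int) : List Int :=
  if temp < n then pvALoopW n (pvStep temp) (x ++ [temp]) else x
termination_by (n - temp).toNat
decreasing_by have := pvStep_gt temp; omega

def pvSeqW (n t : Int) : List Int :=
  if t < n then t :: pvSeqW n (pvStep t) else []
termination_by (n - t).toNat
decreasing_by have := pvStep_gt t; omega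

theorem pvALoop_eqW {n temp : Int} {x : List Int} {f : Nat}
    (hf : (n - temp).toNat ≤ f) :
    pvALoop f n temp x = pvALoopW n temp x := by
  induction f generalizing temp x with
  | zero => rw [pvALoop, pvALoopW, if_neg (by omega)]
  | succ f ih =>
    rw [pvALoop]
    by_cases h : temp < n
    · rw [if_pos h]
      have hs := pvStep_gt temp
      have : (if temp < 10 then temp + 2
         else if 10 ≤ temp ∧ temp < 30 then temp + 3
         else if 30 ≤ temp ∧ temp < 100 then temp + 5
         else if 100 ≤ temp ∧ temp < 200 then temp + 10
         else if 200 ≤ temp ∧ temp < 300 then temp + 50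
         else if 300 ≤ temp ∧ temp < 500 then temp + 100
         else if 500 ≤ temp then temp + 500
         else temp) = pvStep temp := rfl
      rw [this, ih (by omega)]
      conv_rhs => rw [pvALoopW]
      rw [if_pos h]
    · rw [if_neg h, pvALoopW, if_neg h]

theorem pvALoopW_eq_seq (n temp : Int) (x : List Int) :
    pvALoopW n temp x = x ++ pvSeqW n temp := by
  by_cases h : temp < n
  · rw [pvALoopW, if_pos h, pvSeqW, if_pos h,
      pvALoopW_eq_seq n (pvStep temp) (x ++ [temp]), List.append_assoc]
    rfl
  · rw [pvALoopW, if_neg h, pvSeqW, if_neg h, List.append_nil]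
termination_by (n - temp).toNat
decreasing_by have := pvStep_gt temp; omega

-- l is an initial orbit segment of pvStep starting at t and ending at t'
def pvIsOrbit : List Int → Int → Int → Bool
  | [], t, t' => t == t'
  | a :: l, t, t' => a == t && pvIsOrbit l (pvStep t) t'

theorem pvIsOrbit_lb {l : List Int} {t t' : Int} (h : pvIsOrbit l t t' = true) :
    t ≤ t' ∧ ∀ a ∈ l, t ≤ a := by
  induction l generalizing t with
  | nil =>
    simp only [pvIsOrbit, beq_iff_eq] at h
    exact ⟨le_of_eq h, by simp⟩
  | cons a l ih =>
    simp only [pvIsOrbit, Bool.and_eq_true, beq_iff_eq] at h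
    obtain ⟨rfl, h2⟩ := h
    have hs := pvStep_gt a
    obtain ⟨h3, h4⟩ := ih h2
    refine ⟨by omega, ?_⟩
    intro b hb
    rcases List.mem_cons.mp hb with rfl | hb
    · exact le_refl _
    · have := h4 b hb; omega

theorem pvSeqW_orbit {l : List Int} {t t' : Int} (n : Int)
    (h : pvIsOrbit l t t' = true) :
    pvSeqW n t = l.filter (fun v => decide (v < n)) ++ pvSeqW n t' := by
  induction l generalizing t with
  | nil =>
    simp only [pvIsOrbit, beq_iff_eq] at h
    subst h; simp
  | cons a l ih =>
    simp only [pvIsOrbit, Bool.and_eq_true, beq_iff_eq] at h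
    obtain ⟨rfl, h2⟩ := h
    by_cases hn : a < n
    · rw [pvSeqW, if_pos hn, ih h2, List.filter_cons_of_pos (by simpa using hn)]
      rfl
    · rw [pvSeqW, if_neg hn]
      obtain ⟨h3, h4⟩ := pvIsOrbit_lb h2
      have hs := pvStep_gt a
      rw [List.filter_cons_of_neg (by simpa using hn)]
      rw [List.filter_eq_nil_iff.mpr (by intro b hb; have := h4 b hb; simp; omega)]
      rw [pvSeqW, if_neg (by omega)]
      rfl

theorem pvOrbit_isOrbit : pvIsOrbit pvOrbit 2 1001 = true := by decide

-- range(t, n, 500) unrolled one step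
theorem pvRange500_cons {a b : Int} (h : a < b) :
    PySem.List.pyRange a b 500 = a :: PySem.List.pyRange (a + 500) b 500 := by
  rw [PySem.List.pyRange_of_pos a b (by norm_num),
      PySem.List.pyRange_of_pos (a + 500) b (by norm_num)]
  rw [if_pos h]
  have hN : ((b - a + 500 - 1) / 500).toNat
      = (if a + 500 < b then ((b - (a + 500) + 500 - 1) / 500).toNat else 0) + 1 := by
    split_ifs <;> omega
  rw [hN, List.range_succ_eq_map, List.map_cons, List.map_map]
  refine congrArg₂ _ (by ring) ?_
  refine List.map_congr_left ?_
  intro k _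
  simp [Function.comp]
  ring

theorem pvRange500_nil {a b : Int} (h : ¬ a < b) :
    PySem.List.pyRange a b 500 = [] := by
  rw [PySem.List.pyRange_of_pos a b (by norm_num), if_neg h]
  simp

theorem pvSeqW_tail (n : Int) : ∀ t : Int, 500 ≤ t →
    pvSeqW n t = PySem.List.pyRange t n 500 := by
  intro t ht
  by_cases h : t < n
  · have hstep : pvStep t = t + 500 := by unfold pvStep; split_ifs <;> omega
    rw [pvSeqW, if_pos h, hstep, pvSeqW_tail n (t + 500) (by omega), pvRange500_cons h]
  · rw [pvSeqW, if_neg h, pvRange500_nil h]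
termination_by t => (n - t).toNat
decreasing_by omega

-- ===== VERDICT =====
theorem train_set_of_py_spec : Claim_equal_train_set_of_py := by
  intro n _ _
  unfold Spec_train_set_of_py train_set_of_py train_set_of_py_alt
  rw [pvALoop_eqW (le_refl _), pvALoopW_eq_seq, List.nil_append,
      pvSeqW_orbit n pvOrbit_isOrbit, pvSeqW_tail n 1001 (by norm_num)]
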